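-- pv_equiv track=rewrite | github.com/upb-lea/FEM_Magnetics_Toolbox | femmt/functions_drawing.py | get_set_of_integers_from_string_list
-- ===== SOURCE A (Python) =====
-- def get_set_of_integers_from_string_list(string_list: list[str]):
--     """Get the list of the set of integers in a list of strings.
--
--     Used by winding_scheme key.
--
--     :param string_list:
--     :type string_list: list[str]
--     """
--     integer_list = []
--     for single_string in string_list:
--         try:
--             if int(single_string) not in integer_list:
--                 integer_list.append(int(single_string))
--         except:
--             pass
--     return integer_list
-- ===== SOURCE B (Python) =====
-- def get_set_of_integers_from_string_list(string_list: list[str]):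
--     """Parse pass, then filter-ahead dedup: repeatedly take the front element and
--     delete all its later duplicates, instead of checking each element against the
--     already-kept ones."""
--     parsed = []
--     for single_string in string_list:
--         try:
--             parsed.append(int(single_string))
--         except:
--             pass
--     result = []
--     while parsed:
--         head = parsed[0]
--         result.append(head)
--         parsed = [y for y in parsed[1:] if y != head]
--     return result
-- ===== Notes on version B (the rewrite author's own statement) =====
-- stated objective: alternative
-- what changed: A does one loop with a backward membership check against the accumulated result before each append; B first collects all parseable ints, then dedups by a filter-ahead scheme: repeatedly emit the front element and delete all its later duplicates, so no membership test against the output ever happens.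
import Mathlib
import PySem

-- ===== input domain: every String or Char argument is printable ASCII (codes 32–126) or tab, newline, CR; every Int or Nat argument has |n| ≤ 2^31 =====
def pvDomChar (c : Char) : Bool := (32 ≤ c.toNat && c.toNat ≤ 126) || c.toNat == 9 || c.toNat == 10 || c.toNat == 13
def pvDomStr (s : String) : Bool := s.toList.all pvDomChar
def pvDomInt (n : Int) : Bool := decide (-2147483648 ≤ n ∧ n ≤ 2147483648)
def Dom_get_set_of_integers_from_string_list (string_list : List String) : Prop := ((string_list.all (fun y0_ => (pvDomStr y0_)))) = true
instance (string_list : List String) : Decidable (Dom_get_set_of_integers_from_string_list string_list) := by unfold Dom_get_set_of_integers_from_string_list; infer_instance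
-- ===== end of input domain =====

-- B replaces A's single loop with a membership check against the output by a parse pass
-- plus a filter-ahead dedup (emit front, delete its later duplicates); alternative, not faster.


-- ===== PORT A =====
-- Port of A: one loop, per-element int() with membership check before append.
def get_set_of_integers_from_string_list (string_list : List String) : List Int :=
  string_list.foldl (fun integer_list single_string =>
    match PySem.Int.ofStr? single_string with
    | none => integer_list                    -- except: pass
    | some n => if n ∈ integer_list then integer_list else integer_list ++ [n]) []

-- ===== PORT B =====
-- B's while loop: take the front element, drop all its later duplicates, repeat.
def pvDedupAhead : List Int → List Int
  | [] => []
  | head :: rest => head :: pvDedupAhead (rest.filter (fun y => y ≠ head))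
termination_by l => l.length
decreasing_by simpa using Nat.lt_succ_of_le ((List.length_filter_le _ rest.attach).trans (Nat.le_of_eq List.length_attach))


-- Port of B: parse/filter pass, then filter-ahead dedup.
def get_set_of_integers_from_string_list_alt (string_list : List String) : List Int :=
  pvDedupAhead (string_list.filterMap (fun s => PySem.Int.ofStr? s))

-- ===== PRECONDITION & SPEC =====
def Spec_get_set_of_integers_from_string_list (string_list : List String) (out : List Int) : Prop := out = get_set_of_integers_from_string_list_alt string_list
instance (string_list : List String) (out : List Int) : Decidable (Spec_get_set_of_integers_from_string_list string_list out) := by unfold Spec_get_set_of_integers_from_string_list; infer_instance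

-- ===== CLAIM (what is proved, stated in full; the proofs are below) =====
def Claim_equal_get_set_of_integers_from_string_list : Prop := ∀ (string_list : List String), Dom_get_set_of_integers_from_string_list string_list → Spec_get_set_of_integers_from_string_list string_list (get_set_of_integers_from_string_list string_list)

-- ===== LEMMAS AND PROOFS =====
@[simp] lemma pvDedupAhead_nil : pvDedupAhead [] = [] := by rw [pvDedupAhead.eq_def]
@[simp] lemma pvDedupAhead_cons (x : Int) (l : List Int) :
    pvDedupAhead (x :: l) = x :: pvDedupAhead (l.filter (fun y => y ≠ x)) := by
  rw [pvDedupAhead.eq_def]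

-- A's loop, restricted to the parsed values: fold of Set.add.
lemma foldA_eq_foldAdd (xs : List String) (acc : List Int) :
    xs.foldl (fun integer_list single_string =>
      match PySem.Int.ofStr? single_string with
      | none => integer_list
      | some n => if n ∈ integer_list then integer_list else integer_list ++ [n]) acc
    = (xs.filterMap (fun s => PySem.Int.ofStr? s)).foldl PySem.Set.add acc := by
  induction xs generalizing acc with
  | nil => rfl
  | cons x xs ih =>
    cases h : PySem.Int.ofStr? x with
    | none => simp [h, ih]
    | some n => simp [h, ih, PySem.Set.add, PySem.Set.contains]

-- The fold of Set.add equals acc followed by the filter-ahead dedup of the not-yet-seen elements.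
lemma foldAdd_eq_dedupAhead (l : List Int) (acc : List Int) :
    l.foldl PySem.Set.add acc = acc ++ pvDedupAhead (l.filter (fun y => y ∉ acc)) := by
  induction l generalizing acc with
  | nil => simp
  | cons x l ih =>
    by_cases hx : x ∈ acc
    · have : PySem.Set.add acc x = acc := by
        simp [PySem.Set.add, PySem.Set.contains, hx]
      rw [List.foldl_cons, this, ih]; simp [hx]
    · have hadd : PySem.Set.add acc x = acc ++ [x] := by
        simp [PySem.Set.add, PySem.Set.contains, hx]
      rw [List.foldl_cons, hadd, ih]
      have hfil : l.filter (fun y => y ∉ acc ++ [x])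
          = (l.filter (fun y => y ∉ acc)).filter (fun y => y ≠ x) := by
        rw [List.filter_filter]
        apply List.filter_congr
        intro a _
        by_cases h1 : a = x <;> by_cases h2 : a ∈ acc <;> simp [h1, h2]
      rw [hfil]
      simp [hx, pvDedupAhead_cons, List.filter_filter]

-- ===== VERDICT (by name: the statement is the Claim_ definition above) =====
theorem get_set_of_integers_from_string_list_spec : Claim_equal_get_set_of_integers_from_string_list := by
  intro xs _
  unfold Spec_get_set_of_integers_from_string_list get_set_of_integers_from_string_list
    get_set_of_integers_from_string_list_alt
  rw [foldA_eq_foldAdd, foldAdd_eq_dedupAhead]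
  simp
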